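-- pv_equiv track=rewrite | github.com/mbasagoitia/data-structures-and-algorithms-python | linear-programming-approximation-algorithms/examples/pulp/practice-problems.py | memoTargetSum
-- ===== SOURCE A (Python) =====
-- def memoTargetSum(S, tgt):
--     k = len(S)
--     assert tgt >= 0
--     ## Fill in base case for T[(i,j)] where i == k
--     T = {} # Memo table initialized as empty dictionary
--     for j in range(tgt+1):
--         T[(k,j)] = j
--     # your code here
--     for i in range(k - 1, -1, -1):
--         for j in range(tgt + 1):
--             T[(i, j)] = T[(i + 1, j)]
--
--             if j >= S[i]:
--                 T[(i, j)] = min(T[(i, j)], T[(i + 1, j - S[i])])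
--
--
--     return T
-- ===== SOURCE B (Python) =====
-- def memoTargetSum(S, tgt):
--     assert tgt >= 0
--     k = len(S)
--     # reach[i]: sorted distinct achievable subset sums of the suffix S[i:], capped at tgt.
--     # T[(i,j)] = min over subsets of S[i:] with sum <= j of (j - sum) = j - (largest reachable sum <= j),
--     # so each row is filled by one two-pointer sweep over the sorted reach list instead of the DP recurrence.
--     reach = [None] * (k + 1)
--     reach[k] = [0]
--     for i in range(k - 1, -1, -1):
--         prev = reach[i + 1]
--         reach[i] = sorted(set(prev) | {x + S[i] for x in prev if x + S[i] <= tgt})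
--     T = {}
--     for j in range(tgt + 1):
--         T[(k, j)] = j
--     for i in range(k - 1, -1, -1):
--         r = reach[i]
--         p = 0
--         for j in range(tgt + 1):
--             while p + 1 < len(r) and r[p + 1] <= j:
--                 p += 1
--             T[(i, j)] = j - r[p]
--     return T
-- ===== Notes on version B (the rewrite author's own statement) =====
-- stated objective: alternative
-- what changed: Replaces the min-recurrence DP (each cell from the two cells of the row below) by computing, per suffix, the sorted set of achievable subset sums capped at tgt, and filling each row with a two-pointer sweep T[(i,j)] = j - (largest reachable sum <= j); no DP recurrence remains.
import Mathlib
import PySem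

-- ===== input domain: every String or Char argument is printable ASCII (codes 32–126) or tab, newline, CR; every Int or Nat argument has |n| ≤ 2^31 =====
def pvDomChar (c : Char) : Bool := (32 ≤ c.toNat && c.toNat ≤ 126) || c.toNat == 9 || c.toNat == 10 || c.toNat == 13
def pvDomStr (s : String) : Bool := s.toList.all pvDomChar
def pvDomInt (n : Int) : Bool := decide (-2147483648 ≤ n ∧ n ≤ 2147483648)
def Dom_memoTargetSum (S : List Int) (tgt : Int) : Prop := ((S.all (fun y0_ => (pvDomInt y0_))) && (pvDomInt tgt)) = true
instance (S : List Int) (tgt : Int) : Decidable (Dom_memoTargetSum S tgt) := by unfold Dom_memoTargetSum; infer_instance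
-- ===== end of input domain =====

-- B replaces the min-recurrence DP by a different algorithm: per suffix it computes the sorted set
-- of achievable subset sums (capped at tgt) and fills each row by a two-pointer sweep
-- T[(i,j)] = j - (largest reachable sum <= j); the table is assembled in the same insertion order.

-- ===== PORT A =====
-- Dict lookups use getD 0: under Pre_ the looked-up key is always present (Python would raise
-- KeyError where it is not, and Pre_ excludes exactly those inputs).
def memoTargetSum (S : List Int) (tgt : Int) : List (Int × Int × Int) :=
  let k : Int := S.length
  let T0 : PySem.Dict (Int × Int) Int :=
    (PySem.List.pyRange 0 (tgt + 1)).foldl (fun T j => T.insert (k, j) j) PySem.Dict.empty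
  let T : PySem.Dict (Int × Int) Int :=
    (PySem.List.pyRange (k - 1) (-1) (-1)).foldl (fun T i =>
      (PySem.List.pyRange 0 (tgt + 1)).foldl (fun T j =>
        let T1 := T.insert (i, j) (T.getD (i + 1, j) 0)
        if PySem.List.pyGetD S i 0 ≤ j then
          T1.insert (i, j) (min (T1.getD (i, j) 0) (T1.getD (i + 1, j - PySem.List.pyGetD S i 0) 0))
        else T1) T) T0
  T.items.map (fun p => (p.1.1, p.1.2, p.2))

-- ===== PORT B =====
-- Source B's 'sorted(set(prev) | {x + S[i] for x in prev if x + S[i] <= tgt})' (the set comprehension's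
-- element list is consumed only through sorted-with-identity-key, so any representative list is exact)
def pvReachStep (tgt s : Int) (prev : List Int) : List Int :=
  PySem.List.sorted
    (PySem.Set.union (PySem.Set.ofList prev)
      ((prev.filter (fun x => decide (x + s ≤ tgt))).map (fun x => x + s)))
    (fun x => x) false

-- Source B's 'while p + 1 < len(r) and r[p + 1] <= j: p += 1'
-- (structural fuel = r.length - p, invariant under the step, makes the loop kernel-reducible;
--  the guard ensures the fuel never runs out before the while-condition fails)
def pvAdvanceGo (r : List Int) (j : Int) : Nat → Nat → Nat
  | 0, p => p
  | fuel + 1, p =>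
    if p + 1 < r.length ∧ PySem.List.pyGetD r ((p : Int) + 1) 0 ≤ j then
      pvAdvanceGo r j fuel (p + 1)
    else p

def pvAdvance (r : List Int) (j : Int) (p : Nat) : Nat := pvAdvanceGo r j (r.length - p) p

def memoTargetSum_alt (S : List Int) (tgt : Int) : List (Int × Int × Int) :=
  let k : Int := S.length
  -- reach[i] for i = k-1 .. 0; head of reachRev is reach[0], last is reach[k] = [0]
  let reachRev : List (List Int) :=
    S.reverse.foldl (fun acc s => pvReachStep tgt s (acc.headD []) :: acc) [[0]]
  let T0 : PySem.Dict (Int × Int) Int :=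
    (PySem.List.pyRange 0 (tgt + 1)).foldl (fun T j => T.insert (k, j) j) PySem.Dict.empty
  let T : PySem.Dict (Int × Int) Int :=
    (PySem.List.pyRange (k - 1) (-1) (-1)).foldl (fun T i =>
      let r := PySem.List.pyGetD reachRev i []
      ((PySem.List.pyRange 0 (tgt + 1)).foldl
        (fun (st : Nat × PySem.Dict (Int × Int) Int) j =>
          let p := pvAdvance r j st.1
          (p, st.2.insert (i, j) (j - PySem.List.pyGetD r (p : Int) 0)))
        ((0 : Nat), T)).2) T0
  T.items.map (fun p => (p.1.1, p.1.2, p.2))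

-- ===== PRECONDITION & SPEC =====
-- Pre_ excludes exactly the inputs on which Python A raises: tgt < 0 (AssertionError) and any
-- negative element of S (KeyError at T[(i+1, j - S[i])] with j - S[i] > tgt).
def Pre_memoTargetSum (S : List Int) (tgt : Int) : Prop := 0 ≤ tgt ∧ ∀ s ∈ S, 0 ≤ s
instance (S : List Int) (tgt : Int) : Decidable (Pre_memoTargetSum S tgt) := by
  unfold Pre_memoTargetSum; infer_instance

def pvWitness_memoTargetSum : List Int × Int := ([1, 2], 3)

def Spec_memoTargetSum (S : List Int) (tgt : Int) (out : List (Int × Int × Int)) : Prop := out = memoTargetSum_alt S tgt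
instance (S : List Int) (tgt : Int) (out : List (Int × Int × Int)) : Decidable (Spec_memoTargetSum S tgt out) := by unfold Spec_memoTargetSum; infer_instance

-- ===== CLAIM (what is proved, stated in full; the proofs are below) =====
def Claim_equal_memoTargetSum : Prop := ∀ (S : List Int) (tgt : Int), Dom_memoTargetSum S tgt → Pre_memoTargetSum S tgt → Spec_memoTargetSum S tgt (memoTargetSum S tgt)

-- ===== LEMMAS AND PROOFS =====

-- ---- proof-side names for the pieces of the two ports ----
def pvValF (T : PySem.Dict (Int × Int) Int) (i s j : Int) : Int :=
  if s ≤ j then min (T.getD (i + 1, j) 0) (T.getD (i + 1, j - s) 0) else T.getD (i + 1, j) 0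

def pvAStep (S : List Int) (tgt : Int) (T : PySem.Dict (Int × Int) Int) (i : Int) :
    PySem.Dict (Int × Int) Int :=
  (PySem.List.pyRange 0 (tgt + 1)).foldl (fun T j =>
    let T1 := T.insert (i, j) (T.getD (i + 1, j) 0)
    if PySem.List.pyGetD S i 0 ≤ j then
      T1.insert (i, j) (min (T1.getD (i, j) 0) (T1.getD (i + 1, j - PySem.List.pyGetD S i 0) 0))
    else T1) T

def pvBStep (reachRev : List (List Int)) (tgt : Int) (T : PySem.Dict (Int × Int) Int) (i : Int) :
    PySem.Dict (Int × Int) Int :=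
  let r := PySem.List.pyGetD reachRev i []
  ((PySem.List.pyRange 0 (tgt + 1)).foldl
    (fun (st : Nat × PySem.Dict (Int × Int) Int) j =>
      let p := pvAdvance r j st.1
      (p, st.2.insert (i, j) (j - PySem.List.pyGetD r (p : Int) 0)))
    ((0 : Nat), T)).2

-- recurrence row (the value A's inner loop stores at (i, j) given the previous row)
def pvRowNext (tgt : Int) (prev : List Int) (s : Int) : List Int :=
  (PySem.List.pyRange 0 (tgt + 1)).map (fun j =>
    if s ≤ j then min (PySem.List.pyGetD prev j 0) (PySem.List.pyGetD prev (j - s) 0)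
    else PySem.List.pyGetD prev j 0)

-- rows of the recurrence table for suffix Q, head = row for the smallest index
def pvRRfor (tgt : Int) (Q : List Int) : List (List Int) :=
  Q.reverse.foldl (fun rr s => pvRowNext tgt (rr.headD []) s :: rr) [PySem.List.pyRange 0 (tgt + 1)]

-- the reach lists of B's port, head-first (head = reach of the whole Q)
def pvRchFor (tgt : Int) (Q : List Int) : List (List Int) :=
  Q.reverse.foldl (fun acc s => pvReachStep tgt s (acc.headD []) :: acc) [[0]]

-- reach of one suffix, by structural recursion
def pvReachOf (tgt : Int) : List Int → List Int
  | [] => [0]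
  | s :: rest => pvReachStep tgt s (pvReachOf tgt rest)

-- largest reachable sum ≤ j (with 0 as base)
def pvMaxle (r : List Int) (j : Int) : Int := (r.filter (fun x => decide (x ≤ j))).foldl max 0

-- the row the sweep produces for reach list r
def pvRowOf (tgt : Int) (r : List Int) : List Int :=
  (PySem.List.pyRange 0 (tgt + 1)).map (fun j => j - pvMaxle r j)

-- the dict-items block layout shared by both ports
def pvFlat (k : Int) (rowsRev : List (List Int)) : List ((Int × Int) × Int) :=
  (PySem.List.enumerate rowsRev.reverse).flatMap (fun di =>
    (PySem.List.enumerate di.2).map (fun jv => ((k - di.1, jv.1), jv.2)))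

def pvIdxList (a : Nat) : List Int := ((List.range a).reverse).map (fun t : Nat => (t : Int))

lemma pvA_eq (S : List Int) (tgt : Int) :
    memoTargetSum S tgt =
      (((PySem.List.pyRange ((S.length : Int) - 1) (-1) (-1)).foldl (pvAStep S tgt)
        (((PySem.List.pyRange 0 (tgt + 1))).foldl (fun T j => T.insert ((S.length : Int), j) j)
          PySem.Dict.empty)).items).map (fun p => (p.1.1, p.1.2, p.2)) := rfl

lemma pvB_eq (S : List Int) (tgt : Int) :
    memoTargetSum_alt S tgt =
      (((PySem.List.pyRange ((S.length : Int) - 1) (-1) (-1)).foldl (pvBStep (pvRchFor tgt S) tgt)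
        (((PySem.List.pyRange 0 (tgt + 1))).foldl (fun T j => T.insert ((S.length : Int), j) j)
          PySem.Dict.empty)).items).map (fun p => (p.1.1, p.1.2, p.2)) := rfl

-- ---- range / enumerate facts ----

lemma pvRange_nil {a b : Int} (h : b ≤ a) : PySem.List.pyRange a b = [] := by
  simp [PySem.List.pyRange]; omega

lemma pvR_eq (tgt : Int) (h : 0 ≤ tgt) :
    PySem.List.pyRange 0 (tgt + 1) = (List.range (tgt + 1).toNat).map (fun t : Nat => (t : Int)) := by
  have h2 : ((tgt + 1).toNat : Int) = tgt + 1 := by omega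
  have h3 := PySem.List.pyRange_zero_natCast (tgt + 1).toNat
  rw [h2] at h3
  exact h3

lemma pvR_nodup (tgt : Int) (h : 0 ≤ tgt) : ((PySem.List.pyRange 0 (tgt + 1))).Nodup := by
  rw [pvR_eq tgt h]
  exact (List.nodup_range).map (fun a b => by omega)

lemma pvMem_R {tgt j : Int} : j ∈ (PySem.List.pyRange 0 (tgt + 1)) ↔ 0 ≤ j ∧ j < tgt + 1 := PySem.List.mem_pyRange_one

lemma pvEnum_map {α β : Type} (f : α → β) (l : List α) (s : Int) :
    PySem.List.enumerate (l.map f) s = (PySem.List.enumerate l s).map (fun p => (p.1, f p.2)) := by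
  induction l generalizing s with
  | nil => rfl
  | cons x t ih => simp [PySem.List.enumerate, ih]

lemma pvEnum_append {α : Type} (l₁ l₂ : List α) (s : Int) :
    PySem.List.enumerate (l₁ ++ l₂) s =
      PySem.List.enumerate l₁ s ++ PySem.List.enumerate l₂ (s + l₁.length) := by
  induction l₁ generalizing s with
  | nil => simp [PySem.List.enumerate]
  | cons x t ih => simp [PySem.List.enumerate, ih]; ring_nf

lemma pvEnum_pyRange (a b : Int) :
    PySem.List.enumerate (PySem.List.pyRange a b) a =
      (PySem.List.pyRange a b).map (fun j => (j, j)) := by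
  by_cases h : a < b
  · have : (b - a).toNat ≠ 0 := by omega
    obtain ⟨n, hn⟩ : ∃ n, (b - a).toNat = n := ⟨_, rfl⟩
    induction n generalizing a with
    | zero => omega
    | succ m ih =>
      rw [PySem.List.pyRange_one_cons h]
      by_cases h2 : a + 1 < b
      · simp only [PySem.List.enumerate, List.map_cons]
        rw [ih (a + 1) h2 (by omega) (by omega)]
      · have : PySem.List.pyRange (a + 1) b = [] := pvRange_nil (by omega)
        simp [this, PySem.List.enumerate]
  · rw [pvRange_nil (by omega)]; rfl

lemma pvGetD_R {tgt j : Int} (h : 0 ≤ tgt) (hj : j ∈ (PySem.List.pyRange 0 (tgt + 1))) :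
    PySem.List.pyGetD ((PySem.List.pyRange 0 (tgt + 1))) j 0 = j := by
  rw [pvMem_R] at hj
  rw [pvR_eq tgt h]
  have hj' : j = ((j.toNat : Nat) : Int) := by omega
  rw [hj', PySem.List.pyGetD_natCast, PySem.List.getD_map_range _ _ _ _ (by omega)]

lemma pvGetD_mapRange {tgt j : Int} (f : Int → Int) (h : 0 ≤ tgt) (hj : j ∈ (PySem.List.pyRange 0 (tgt + 1))) :
    PySem.List.pyGetD ((PySem.List.pyRange 0 (tgt + 1)).map f) j 0 = f j := by
  rw [pvMem_R] at hj
  have htn : (tgt + 1) = (((tgt + 1).toNat : Nat) : Int) := by omega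
  have hj' : j = ((j.toNat : Nat) : Int) := by omega
  rw [htn, hj', PySem.List.pyGetD_map_pyRange _ _ _ _ (by omega)]

lemma pvGetD_rowNext {tgt s j : Int} (prev : List Int) (h : 0 ≤ tgt) (hj : j ∈ (PySem.List.pyRange 0 (tgt + 1))) :
    PySem.List.pyGetD (pvRowNext tgt prev s) j 0 =
      (if s ≤ j then min (PySem.List.pyGetD prev j 0) (PySem.List.pyGetD prev (j - s) 0)
       else PySem.List.pyGetD prev j 0) := pvGetD_mapRange _ h hj

lemma pvIdx_succ (a : Nat) : pvIdxList (a + 1) = (a : Int) :: pvIdxList a := by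
  simp [pvIdxList, List.range_succ]

lemma pvDown_eq (n : Nat) : PySem.List.pyRange ((n : Int) - 1) (-1) (-1) = pvIdxList n := by
  cases n with
  | zero => rw [pvIdxList]; simp [PySem.List.pyRange]
  | succ m =>
    rw [PySem.List.pyRange]
    have h0 : ¬ ((-1 : Int) = 0) := by omega
    have h1 : ¬ ((0 : Int) < -1) := by omega
    have h2 : (-1 : Int) < ((m + 1 : Nat) : Int) - 1 := by push_cast; omega
    simp only [if_neg h0, if_pos h2, if_neg h1]
    have hc : ((((m + 1 : Nat) : Int) - 1 - -1 + - -1 - 1) / - -1).toNat = m + 1 := by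
      push_cast; omega
    rw [hc]
    apply List.ext_getElem
    · simp [pvIdxList]
    · intro i h₁ h₂
      have hi : i < m + 1 := by simpa using h₁
      simp only [pvIdxList, List.getElem_map, List.getElem_reverse, List.getElem_range,
        List.length_range]
      push_cast
      omega

lemma pvRRfor_cons (tgt : Int) (s : Int) (Q : List Int) :
    pvRRfor tgt (s :: Q) =
      pvRowNext tgt ((pvRRfor tgt Q).headD []) s :: pvRRfor tgt Q := by
  rw [pvRRfor, pvRRfor, List.reverse_cons, List.foldl_append]
  rfl

lemma pvRchFor_cons (tgt : Int) (s : Int) (Q : List Int) :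
    pvRchFor tgt (s :: Q) =
      pvReachStep tgt s ((pvRchFor tgt Q).headD []) :: pvRchFor tgt Q := by
  rw [pvRchFor, pvRchFor, List.reverse_cons, List.foldl_append]
  rfl

lemma pvRchFor_eq (tgt : Int) (Q : List Int) :
    pvRchFor tgt Q = Q.tails.map (pvReachOf tgt) := by
  induction Q with
  | nil => rfl
  | cons s Q ih =>
    have hh : (Q.tails.map (pvReachOf tgt)).headD [] = pvReachOf tgt Q := by
      cases Q <;> rfl
    rw [pvRchFor_cons, ih, hh]
    simp [pvReachOf]

lemma pvFlat_cons (k : Int) (r : List Int) (rr : List (List Int)) :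
    pvFlat k (r :: rr) =
      pvFlat k rr ++
        (PySem.List.enumerate r).map (fun jv => ((k - rr.length, jv.1), jv.2)) := by
  rw [pvFlat, pvFlat, List.reverse_cons, pvEnum_append, List.flatMap_append]
  congr 1
  simp [PySem.List.enumerate]

lemma pvBlock_eq (i tgt : Int) (f : Int → Int) :
    (PySem.List.enumerate ((PySem.List.pyRange 0 (tgt + 1)).map f)).map (fun jv => ((i, jv.1), jv.2)) =
      (PySem.List.pyRange 0 (tgt + 1)).map (fun j => ((i, j), f j)) := by
  rw [pvEnum_map]
  have : PySem.List.enumerate ((PySem.List.pyRange 0 (tgt + 1))) 0 = ((PySem.List.pyRange 0 (tgt + 1))).map (fun j => (j, j)) := by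
    exact pvEnum_pyRange 0 (tgt + 1)
  rw [this]
  simp [List.map_map, Function.comp]

lemma pvEnumBlock_base (k tgt : Int) :
    (PySem.List.enumerate (PySem.List.pyRange 0 (tgt + 1))).map (fun jv => ((k, jv.1), jv.2)) =
      (PySem.List.pyRange 0 (tgt + 1)).map (fun j => ((k, j), j)) := by
  rw [pvEnum_pyRange 0 (tgt + 1)]
  simp [List.map_map, Function.comp]

-- ---- dict fold facts ----

lemma pvfst_ne {i i' j j' : Int} (h : i ≠ i') : ((i, j) : Int × Int) ≠ (i', j') := by
  intro hEq
  exact h (congrArg Prod.fst hEq)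

lemma pvGet?_fold_of_ne (l : List Int) (i : Int) (f : Int → Int)
    (d : PySem.Dict (Int × Int) Int) (q : Int × Int) (h : ∀ a ∈ l, q ≠ (i, a)) :
    (l.foldl (fun d a => d.insert (i, a) (f a)) d).get? q = d.get? q := by
  induction l generalizing d with
  | nil => rfl
  | cons a t ih =>
    simp only [List.foldl_cons]
    rw [ih _ (fun b hb => h b (List.mem_cons_of_mem _ hb)),
      PySem.Dict.get?_insert_of_ne _ _ (h a (List.mem_cons_self))]

lemma pvGet?_fold_mem (l : List Int) (hnd : l.Nodup) (i : Int) (f : Int → Int)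
    (d : PySem.Dict (Int × Int) Int) (j : Int) (hj : j ∈ l) :
    (l.foldl (fun d a => d.insert (i, a) (f a)) d).get? (i, j) = some (f j) := by
  induction l generalizing d with
  | nil => cases hj
  | cons a t ih =>
    simp only [List.foldl_cons]
    rcases List.mem_cons.mp hj with rfl | hjt
    · have hni : ∀ b ∈ t, ((i, j) : Int × Int) ≠ (i, b) := by
        intro b hb hq
        have hjb : j = b := congrArg Prod.snd hq
        exact (List.nodup_cons.mp hnd).1 (hjb ▸ hb)
      rw [pvGet?_fold_of_ne _ _ _ _ _ hni, PySem.Dict.get?_insert_self]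
    · exact ih (List.nodup_cons.mp hnd).2 _ hjt

lemma pvContains_fold (l : List Int) (i : Int) (f : Int → Int)
    (d : PySem.Dict (Int × Int) Int) (q : Int × Int)
    (h : (l.foldl (fun d a => d.insert (i, a) (f a)) d).contains q = true) :
    d.contains q = true ∨ ∃ a ∈ l, q = (i, a) := by
  induction l generalizing d with
  | nil => exact .inl h
  | cons a t ih =>
    simp only [List.foldl_cons] at h
    rcases ih _ h with h' | ⟨b, hb, rfl⟩
    · rw [PySem.Dict.contains_insert] at h'
      simp only [Bool.or_eq_true, beq_iff_eq] at h'
      rcases h' with h'' | h''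
      · exact .inr ⟨a, List.mem_cons_self, h''⟩
      · exact .inl h''
    · exact .inr ⟨b, List.mem_cons_of_mem _ hb, rfl⟩

-- A's inner loop collapses to a single insert per j, with all values read from the initial dict.
lemma pvInner_collapse (s i : Int) :
    ∀ (l : List Int) (T : PySem.Dict (Int × Int) Int),
      (l.foldl (fun T j =>
        let T1 := T.insert (i, j) (T.getD (i + 1, j) 0)
        if s ≤ j then
          T1.insert (i, j) (min (T1.getD (i, j) 0) (T1.getD (i + 1, j - s) 0))
        else T1) T) =
      l.foldl (fun d j => d.insert (i, j) (pvValF T i s j)) T := by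
  intro l
  induction l with
  | nil => intro T; rfl
  | cons a t ih =>
    intro T
    have hstep : (let T1 := T.insert (i, a) (T.getD (i + 1, a) 0)
        if s ≤ a then
          T1.insert (i, a) (min (T1.getD (i, a) 0) (T1.getD (i + 1, a - s) 0))
        else T1) = T.insert (i, a) (pvValF T i s a) := by
      show (if s ≤ a then
          (T.insert (i, a) (T.getD (i + 1, a) 0)).insert (i, a)
            (min ((T.insert (i, a) (T.getD (i + 1, a) 0)).getD (i, a) 0)
              ((T.insert (i, a) (T.getD (i + 1, a) 0)).getD (i + 1, a - s) 0))
        else T.insert (i, a) (T.getD (i + 1, a) 0)) = T.insert (i, a) (pvValF T i s a)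
      have e3 : (T.insert (i, a) (T.getD (i + 1, a) 0)).getD (i + 1, a - s) 0 =
          T.getD (i + 1, a - s) 0 := by
        rw [PySem.Dict.getD_insert, if_neg (pvfst_ne (by omega))]
      simp only [pvValF]
      split_ifs with h
      · rw [PySem.Dict.getD_insert_self, e3, PySem.Dict.insert_insert_self]
      · rfl
    simp only [List.foldl_cons]
    rw [hstep, ih]
    have hval : ∀ j, pvValF (T.insert (i, a) (pvValF T i s a)) i s j = pvValF T i s j := by
      intro j
      have e1 : ∀ (v x : Int), (T.insert (i, a) v).getD (i + 1, x) 0 =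
          T.getD (i + 1, x) 0 := by
        intro v x
        rw [PySem.Dict.getD_insert, if_neg (pvfst_ne (by omega))]
      simp only [pvValF, e1]
    have hfun : (fun (d : PySem.Dict (Int × Int) Int) j =>
        d.insert (i, j) (pvValF (T.insert (i, a) (pvValF T i s a)) i s j)) =
        (fun d j => d.insert (i, j) (pvValF T i s j)) := by
      funext d j
      rw [hval]
    rw [hfun]

-- ---- reach-set facts ----

def pvGood (tgt : Int) (r : List Int) : Prop :=
  (0 : Int) ∈ r ∧ (∀ x ∈ r, 0 ≤ x ∧ x ≤ tgt) ∧ r.Pairwise (· < ·)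

lemma pvMem_reachStep {tgt s : Int} {prev : List Int} {y : Int} :
    y ∈ pvReachStep tgt s prev ↔ y ∈ prev ∨ ∃ x ∈ prev, y = x + s ∧ y ≤ tgt := by
  simp only [pvReachStep, PySem.List.mem_sorted, PySem.Set.mem_union, PySem.Set.mem_ofList,
    List.mem_map, List.mem_filter, decide_eq_true_eq]
  constructor
  · rintro (h | ⟨x, ⟨hx, hle⟩, rfl⟩)
    · exact .inl h
    · exact .inr ⟨x, hx, rfl, hle⟩
  · rintro (h | ⟨x, hx, rfl, hle⟩)
    · exact .inl h
    · exact .inr ⟨x, ⟨hx, hle⟩, rfl⟩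

lemma pvGood_reachStep {tgt s : Int} {prev : List Int} (h : pvGood tgt prev) (hs : 0 ≤ s) (_ht : 0 ≤ tgt) :
    pvGood tgt (pvReachStep tgt s prev) := by
  obtain ⟨h0, hbd, _⟩ := h
  refine ⟨pvMem_reachStep.mpr (.inl h0), ?_, ?_⟩
  · intro x hx
    rcases pvMem_reachStep.mp hx with hx' | ⟨y, hy, rfl, hle⟩
    · exact hbd x hx'
    · exact ⟨by have := (hbd y hy).1; omega, hle⟩
  · have hle : (pvReachStep tgt s prev).Pairwise (· ≤ ·) := by
      have := PySem.List.sorted_pairwise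
        (PySem.Set.union (PySem.Set.ofList prev)
          ((prev.filter (fun x => decide (x + s ≤ tgt))).map (fun x => x + s)))
        (fun x : Int => x)
      simpa [pvReachStep] using this
    have hnd : (pvReachStep tgt s prev).Nodup := by
      have hperm := PySem.List.sorted_perm
        (PySem.Set.union (PySem.Set.ofList prev)
          ((prev.filter (fun x => decide (x + s ≤ tgt))).map (fun x => x + s)))
        (fun x : Int => x) false
      have hnd' : (PySem.Set.union (PySem.Set.ofList prev)
          ((prev.filter (fun x => decide (x + s ≤ tgt))).map (fun x => x + s))).Nodup :=
        PySem.Set.nodup_union _ _ (PySem.Set.nodup_ofList prev)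
      exact hperm.symm.nodup hnd'
    exact (hle.and hnd).imp (fun hab => lt_of_le_of_ne hab.1 hab.2)

lemma pvGood_reachOf (tgt : Int) (ht : 0 ≤ tgt) (Q : List Int) (hQ : ∀ s ∈ Q, 0 ≤ s) :
    pvGood tgt (pvReachOf tgt Q) := by
  induction Q with
  | nil =>
    refine ⟨List.mem_singleton.mpr rfl, ?_, List.pairwise_singleton _ _⟩
    intro x hx
    rcases List.mem_singleton.mp hx with rfl
    omega
  | cons s Q ih =>
    exact pvGood_reachStep (ih (fun x hx => hQ x (List.mem_cons_of_mem _ hx)))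
      (hQ s List.mem_cons_self) ht

-- ---- maxle facts ----

lemma pvMaxle_ub {r : List Int} {x j : Int} (hx : x ∈ r) (hxj : x ≤ j) : x ≤ pvMaxle r j :=
  (PySem.List.le_foldl_max (r.filter (fun x => decide (x ≤ j))) 0).2 x
    (List.mem_filter.mpr ⟨hx, by simpa using hxj⟩)

lemma pvMaxle_le {tgt j : Int} {r : List Int} (_hg : pvGood tgt r) (hj : 0 ≤ j) : pvMaxle r j ≤ j := by
  rcases PySem.List.foldl_max_mem (r.filter (fun x => decide (x ≤ j))) 0 with h | h
  · rw [pvMaxle, h]; exact hj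
  · have := (List.mem_filter.mp h).2
    simpa [pvMaxle] using this

lemma pvMaxle_mem {tgt j : Int} {r : List Int} (hg : pvGood tgt r) (_hj : 0 ≤ j) : pvMaxle r j ∈ r := by
  rcases PySem.List.foldl_max_mem (r.filter (fun x => decide (x ≤ j))) 0 with h | h
  · rw [pvMaxle, h]; exact hg.1
  · exact (List.mem_filter.mp h).1

-- the key identity: the largest reachable sum ≤ j after adjoining s
lemma pvMaxle_reachStep {tgt s j : Int} {r : List Int} (hg : pvGood tgt r) (hs : 0 ≤ s)
    (hj0 : 0 ≤ j) (hjt : j ≤ tgt) :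
    pvMaxle (pvReachStep tgt s r) j =
      if s ≤ j then max (pvMaxle r j) (s + pvMaxle r (j - s)) else pvMaxle r j := by
  have hg' := pvGood_reachStep hg hs (by omega)
  have hle : pvMaxle (pvReachStep tgt s r) j ≤
      (if s ≤ j then max (pvMaxle r j) (s + pvMaxle r (j - s)) else pvMaxle r j) := by
    have hmem := pvMaxle_mem hg' hj0
    have hmle := pvMaxle_le hg' hj0
    rcases pvMem_reachStep.mp hmem with hin | ⟨x, hx, heq, hxt⟩
    · have := pvMaxle_ub hin hmle
      split_ifs <;> omega
    · have hx0 : 0 ≤ x := (hg.2.1 x hx).1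
      have hsj : s ≤ j := by omega
      have hxle : x ≤ j - s := by omega
      have hub := pvMaxle_ub hx hxle
      rw [if_pos hsj]
      omega
  have hge : (if s ≤ j then max (pvMaxle r j) (s + pvMaxle r (j - s)) else pvMaxle r j) ≤
      pvMaxle (pvReachStep tgt s r) j := by
    have h1 : pvMaxle r j ≤ pvMaxle (pvReachStep tgt s r) j :=
      pvMaxle_ub (pvMem_reachStep.mpr (.inl (pvMaxle_mem hg hj0))) (pvMaxle_le hg hj0)
    split_ifs with hsj
    · have hj2 : (0 : Int) ≤ j - s := by omega
      have hm2 : pvMaxle r (j - s) ∈ r := pvMaxle_mem hg hj2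
      have hm2le : pvMaxle r (j - s) ≤ j - s := pvMaxle_le hg hj2
      have hmem' : s + pvMaxle r (j - s) ∈ pvReachStep tgt s r :=
        pvMem_reachStep.mpr (.inr ⟨pvMaxle r (j - s), hm2, by omega, by omega⟩)
      have h2 : s + pvMaxle r (j - s) ≤ pvMaxle (pvReachStep tgt s r) j :=
        pvMaxle_ub hmem' (by omega)
      omega
    · exact h1
  omega

-- the recurrence row for the stepped reach equals the maxle row
lemma pvRowNext_rowOf {tgt s : Int} {r : List Int} (hg : pvGood tgt r) (hs : 0 ≤ s) (ht : 0 ≤ tgt) :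
    pvRowNext tgt (pvRowOf tgt r) s = pvRowOf tgt (pvReachStep tgt s r) := by
  rw [pvRowNext, pvRowOf]
  apply List.map_congr_left
  intro j hj
  have hj' := pvMem_R.mp hj
  rw [pvGetD_mapRange _ ht hj]
  rw [pvMaxle_reachStep hg hs hj'.1 (by omega)]
  split_ifs with hsj
  · have hjm : (j - s) ∈ PySem.List.pyRange 0 (tgt + 1) := pvMem_R.mpr ⟨by omega, by omega⟩
    rw [pvGetD_mapRange _ ht hjm]
    omega
  · omega

lemma pvRchFor_headD (tgt : Int) (Q : List Int) :
    (pvRchFor tgt Q).headD [] = pvReachOf tgt Q := by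
  rw [pvRchFor_eq]
  cases Q <;> rfl

lemma pvRowOf_base (tgt : Int) (_ht : 0 ≤ tgt) :
    pvRowOf tgt [0] = PySem.List.pyRange 0 (tgt + 1) := by
  rw [pvRowOf]
  have : ∀ j ∈ PySem.List.pyRange 0 (tgt + 1), j - pvMaxle [0] j = j := by
    intro j hj
    have hj' := pvMem_R.mp hj
    have : pvMaxle [0] j = 0 := by
      have hf : ([0] : List Int).filter (fun x => decide (x ≤ j)) = [0] := by
        simp [hj'.1]
      rw [pvMaxle, hf]
      simp
    omega
  calc (PySem.List.pyRange 0 (tgt + 1)).map (fun j => j - pvMaxle [0] j)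
      = (PySem.List.pyRange 0 (tgt + 1)).map (fun j => j) := List.map_congr_left this
    _ = PySem.List.pyRange 0 (tgt + 1) := List.map_id _

lemma pvRRfor_eq_rowOf (tgt : Int) (ht : 0 ≤ tgt) (Q : List Int) (hQ : ∀ s ∈ Q, 0 ≤ s) :
    pvRRfor tgt Q = (pvRchFor tgt Q).map (pvRowOf tgt) := by
  induction Q with
  | nil =>
    show [PySem.List.pyRange 0 (tgt + 1)] = [pvRowOf tgt [0]]
    rw [pvRowOf_base tgt ht]
  | cons s Q ih =>
    have hQ' : ∀ x ∈ Q, 0 ≤ x := fun x hx => hQ x (List.mem_cons_of_mem _ hx)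
    rw [pvRRfor_cons, pvRchFor_cons, ih hQ', List.map_cons]
    congr 1
    have hh : ((pvRchFor tgt Q).map (pvRowOf tgt)).headD [] = pvRowOf tgt (pvReachOf tgt Q) := by
      rw [pvRchFor_eq]
      cases Q <;> rfl
    rw [hh, pvRchFor_headD]
    exact pvRowNext_rowOf (pvGood_reachOf tgt ht Q hQ') (hQ s List.mem_cons_self) ht

-- ---- the two-pointer sweep computes the maxle row ----

lemma pvChain_getD {r : List Int} (hch : r.Pairwise (· < ·)) {a b : Nat} (hab : a ≤ b)
    (hb : b < r.length) : r.getD a 0 ≤ r.getD b 0 := by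
  have ha : a < r.length := lt_of_le_of_lt hab hb
  rw [List.getD_eq_getElem?_getD, List.getD_eq_getElem?_getD,
    List.getElem?_eq_getElem ha, List.getElem?_eq_getElem hb]
  rcases lt_or_eq_of_le hab with hlt | rfl
  · exact le_of_lt ((List.pairwise_iff_getElem.mp hch) a b ha hb hlt)
  · simp

lemma pvGo_correct {r : List Int} (hch : r.Pairwise (· < ·)) (j : Int) :
    ∀ (fuel p : Nat), p < r.length → r.length - p ≤ fuel + 1 → r.getD p 0 ≤ j →
      pvAdvanceGo r j fuel p < r.length ∧
      r.getD (pvAdvanceGo r j fuel p) 0 ≤ j ∧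
      (∀ m : Nat, m < r.length → r.getD m 0 ≤ j → m ≤ pvAdvanceGo r j fuel p) := by
  intro fuel
  induction fuel with
  | zero =>
    intro p hp hf hle
    simp only [pvAdvanceGo]
    refine ⟨hp, hle, ?_⟩
    intro m hm _
    omega
  | succ fuel ih =>
    intro p hp hf hle
    rw [pvAdvanceGo]
    split_ifs with hgd
    · obtain ⟨h1, h2⟩ := hgd
      have h2' : r.getD (p + 1) 0 ≤ j := by
        have hc : ((p : Int) + 1) = (((p + 1 : Nat) : Nat) : Int) := by push_cast; omega
        rw [hc, PySem.List.pyGetD_natCast] at h2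
        exact h2
      have := ih (p + 1) h1 (by omega) h2'
      refine ⟨this.1, this.2.1, fun m hm hmj => this.2.2 m hm hmj⟩
    · refine ⟨hp, hle, ?_⟩
      intro m hm hmj
      by_contra hcon
      push Not at hcon
      push Not at hgd
      by_cases h1 : p + 1 < r.length
      · have := hgd h1
        have hc : ((p : Int) + 1) = (((p + 1 : Nat) : Nat) : Int) := by push_cast; omega
        rw [hc, PySem.List.pyGetD_natCast] at this
        have hmono : r.getD (p + 1) 0 ≤ r.getD m 0 := pvChain_getD hch (by omega) hm
        omega
      · omega

lemma pvAdvance_correct {tgt : Int} {r : List Int} (hg : pvGood tgt r) {j : Int} (hj : 0 ≤ j)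
    {p : Nat} (hp : p < r.length) (hple : r.getD p 0 ≤ j) :
    pvAdvance r j p < r.length ∧ r.getD (pvAdvance r j p) 0 = pvMaxle r j := by
  have hch := hg.2.2
  have h := pvGo_correct hch j (r.length - p) p hp (by omega) hple
  rw [pvAdvance]
  refine ⟨h.1, ?_⟩
  obtain ⟨m, hm, hmd⟩ := List.mem_iff_getElem.mp (pvMaxle_mem hg hj)
  have hmd' : r.getD m 0 = pvMaxle r j := by
    rw [List.getD_eq_getElem?_getD, List.getElem?_eq_getElem hm]
    simpa using hmd
  have hmq : m ≤ pvAdvanceGo r j (r.length - p) p :=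
    h.2.2 m hm (by rw [hmd']; exact pvMaxle_le hg hj)
  have h1 : r.getD m 0 ≤ r.getD (pvAdvanceGo r j (r.length - p) p) 0 :=
    pvChain_getD hch hmq h.1
  have h2 : r.getD (pvAdvanceGo r j (r.length - p) p) 0 ≤ pvMaxle r j := by
    apply pvMaxle_ub _ h.2.1
    rw [List.getD_eq_getElem?_getD, List.getElem?_eq_getElem h.1]
    exact List.getElem_mem _
  omega

lemma pvGood_head {tgt : Int} {r : List Int} (hg : pvGood tgt r) :
    0 < r.length ∧ r.getD 0 0 = 0 := by
  obtain ⟨h0, hbd, hch⟩ := hg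
  cases r with
  | nil => cases h0
  | cons h t =>
    refine ⟨by simp, ?_⟩
    rcases List.mem_cons.mp h0 with rfl | hmem
    · rfl
    · have h1 := (List.pairwise_cons.mp hch).1 0 hmem
      have h2 := (hbd h List.mem_cons_self).1
      omega

lemma pvSweepFold {tgt : Int} {r : List Int} (hg : pvGood tgt r) (i b : Int) :
    ∀ (n : Nat) (a : Int), (b - a).toNat ≤ n → 0 ≤ a →
      ∀ (p : Nat) (T : PySem.Dict (Int × Int) Int), p < r.length → r.getD p 0 ≤ a →
      ((PySem.List.pyRange a b).foldl
        (fun (st : Nat × PySem.Dict (Int × Int) Int) j =>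
          let p' := pvAdvance r j st.1
          (p', st.2.insert (i, j) (j - PySem.List.pyGetD r ((p' : Nat) : Int) 0)))
        (p, T)).2 =
      (PySem.List.pyRange a b).foldl (fun d j => d.insert (i, j) (j - pvMaxle r j)) T := by
  intro n
  induction n with
  | zero =>
    intro a hn _ p T _ _
    rw [pvRange_nil (by omega)]
    rfl
  | succ n ih =>
    intro a hn ha p T hp hple
    by_cases hab : a < b
    · rw [PySem.List.pyRange_one_cons hab]
      simp only [List.foldl_cons]
      obtain ⟨hq, hqv⟩ := pvAdvance_correct hg ha hp hple
      have hval : PySem.List.pyGetD r ((pvAdvance r a p : Nat) : Int) 0 = pvMaxle r a := by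
        rw [PySem.List.pyGetD_natCast]
        exact hqv
      rw [hval]
      exact ih (a + 1) (by omega) (by omega) (pvAdvance r a p)
        (T.insert (i, a) (a - pvMaxle r a)) hq
        (by rw [hqv]; have := pvMaxle_le hg ha; omega)
    · rw [pvRange_nil (by omega)]
      rfl

lemma pvBStep_collapse {tgt : Int} (ht : 0 ≤ tgt) {r : List Int} (hg : pvGood tgt r)
    (reachRev : List (List Int)) (i : Int)
    (hr : PySem.List.pyGetD reachRev i [] = r) (T : PySem.Dict (Int × Int) Int) :
    pvBStep reachRev tgt T i =
      (PySem.List.pyRange 0 (tgt + 1)).foldl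
        (fun d j => d.insert (i, j) (j - pvMaxle r j)) T := by
  obtain ⟨hlen, hhd⟩ := pvGood_head hg
  rw [pvBStep, hr]
  exact pvSweepFold hg i (tgt + 1) (tgt + 1).toNat 0 (by omega) le_rfl 0 T hlen (by omega)

-- ---- the main invariants ----

lemma pvMain (tgt : Int) (ht : 0 ≤ tgt) (S : List Int) (hS : ∀ s ∈ S, 0 ≤ s) :
    ∀ (P Q : List Int), S = P ++ Q →
      ∀ (T : PySem.Dict (Int × Int) Int),
        T.items = pvFlat (S.length : Int) (pvRRfor tgt Q) →
        (∀ j ∈ (PySem.List.pyRange 0 (tgt + 1)), T.get? ((P.length : Int), j) =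
          some (PySem.List.pyGetD ((pvRRfor tgt Q).headD []) j 0)) →
        (∀ q : Int × Int, T.contains q = true → (P.length : Int) ≤ q.1) →
        ((pvIdxList P.length).foldl (pvAStep S tgt) T).items =
          pvFlat (S.length : Int) (pvRRfor tgt S) := by
  intro P
  induction P using List.reverseRecOn with
  | nil =>
    intro Q hPQ T ha _ _
    simpa [pvIdxList, hPQ] using ha
  | append_singleton P' s ih =>
    intro Q hPQ T ha hb hc
    have hlen : (P' ++ [s]).length = P'.length + 1 := by simp
    rw [hlen, pvIdx_succ, List.foldl_cons]
    have hsval : PySem.List.pyGetD S (P'.length : Int) 0 = s := by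
      rw [hPQ, PySem.List.pyGetD_natCast]
      have : (P' ++ [s] ++ Q) = P' ++ (s :: Q) := by simp
      rw [this, List.getD, List.getElem?_append_right (le_refl P'.length)]
      simp
    have hs0 : 0 ≤ s := hS s (by rw [hPQ]; simp)
    have hvrow : ∀ j ∈ (PySem.List.pyRange 0 (tgt + 1)), pvValF T (P'.length : Int) s j =
        PySem.List.pyGetD (pvRowNext tgt ((pvRRfor tgt Q).headD []) s) j 0 := by
      intro j hj
      have hj' := pvMem_R.mp hj
      rw [pvGetD_rowNext _ ht hj]
      simp only [pvValF, PySem.Dict.getD]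
      have hcast : ((P'.length : Int) + 1) = (((P' ++ [s]).length : Nat) : Int) := by
        simp
      split_ifs with h
      · have hjm : (j - s) ∈ (PySem.List.pyRange 0 (tgt + 1)) := pvMem_R.mpr ⟨by omega, by omega⟩
        rw [hcast, hb j hj, hb (j - s) hjm]
        rfl
      · rw [hcast, hb j hj]; rfl
    have hfresh : ∀ a ∈ (PySem.List.pyRange 0 (tgt + 1)), T.contains ((P'.length : Int), a) = false := by
      intro a _
      by_contra hch
      have := hc _ (Bool.of_not_eq_false hch)
      simp at this
    have hnd : (((PySem.List.pyRange 0 (tgt + 1))).map (fun a => (((P'.length : Int), a) : Int × Int))).Nodup :=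
      (pvR_nodup tgt ht).map (fun a b h => by simpa [Prod.ext_iff] using h)
    have hstep : (pvAStep S tgt T (P'.length : Int)).items =
        T.items ++ ((PySem.List.pyRange 0 (tgt + 1))).map (fun a => (((P'.length : Int), a),
          pvValF T (P'.length : Int) s a)) := by
      rw [pvAStep, pvInner_collapse, hsval]
      exact PySem.Dict.items_foldl_insert_fresh ((PySem.List.pyRange 0 (tgt + 1))) _ _ T hfresh hnd
    have hPQ' : S = P' ++ (s :: Q) := by rw [hPQ]; simp
    apply ih (s :: Q) hPQ'
    · rw [hstep, ha, pvRRfor_cons, pvFlat_cons]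
      have hlab : (S.length : Int) - ((pvRRfor tgt Q).length : Int) = (P'.length : Int) := by
        have hrrlen : (pvRRfor tgt Q).length = Q.length + 1 := by
          rw [pvRRfor]
          have : ∀ (l : List Int) (init : List (List Int)),
              (l.foldl (fun rr s => pvRowNext tgt (rr.headD []) s :: rr) init).length =
                init.length + l.length := by
            intro l
            induction l with
            | nil => simp
            | cons x t ih2 =>
              intro init
              rw [List.foldl_cons, ih2]
              simp
              omega
          rw [this]
          simp
          omega
        rw [hrrlen, hPQ]
        push_cast [List.length_append, List.length_cons, List.length_nil]
        omega
      rw [hlab, pvRowNext, pvBlock_eq]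
      congr 1
      apply List.map_congr_left
      intro j hj
      rw [hvrow j hj, pvGetD_rowNext _ ht hj]
    · intro j hj
      rw [pvRRfor_cons]
      simp only [List.headD_cons]
      rw [pvAStep, pvInner_collapse, hsval,
        pvGet?_fold_mem _ (pvR_nodup tgt ht) _ _ _ _ hj, hvrow j hj]
    · intro q hq
      rw [pvAStep, pvInner_collapse, hsval] at hq
      rcases pvContains_fold _ _ _ _ _ hq with h' | ⟨a, _, rfl⟩
      · have := hc _ h'
        simp at this ⊢
        omega
      · simp

lemma pvRchFor_len (tgt : Int) (Q : List Int) : (pvRchFor tgt Q).length = Q.length + 1 := by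
  rw [pvRchFor_eq]
  simp

lemma pvRchFor_getD (tgt : Int) (S : List Int) {n : Nat} (hn : n ≤ S.length) :
    PySem.List.pyGetD (pvRchFor tgt S) ((n : Nat) : Int) [] = pvReachOf tgt (S.drop n) := by
  rw [pvRchFor_eq, PySem.List.pyGetD_natCast]
  have hlt : n < (S.tails.map (pvReachOf tgt)).length := by simp; omega
  rw [List.getD_eq_getElem?_getD, List.getElem?_eq_getElem hlt]
  simp [List.getElem_tails]

lemma pvMainB (tgt : Int) (ht : 0 ≤ tgt) (S : List Int) (hS : ∀ s ∈ S, 0 ≤ s) :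
    ∀ (P Q : List Int), S = P ++ Q →
      ∀ (T : PySem.Dict (Int × Int) Int),
        T.items = pvFlat (S.length : Int) ((pvRchFor tgt Q).map (pvRowOf tgt)) →
        (∀ q : Int × Int, T.contains q = true → (P.length : Int) ≤ q.1) →
        ((pvIdxList P.length).foldl (pvBStep (pvRchFor tgt S) tgt) T).items =
          pvFlat (S.length : Int) ((pvRchFor tgt S).map (pvRowOf tgt)) := by
  intro P
  induction P using List.reverseRecOn with
  | nil =>
    intro Q hPQ T ha _
    simpa [pvIdxList, hPQ] using ha
  | append_singleton P' s ih =>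
    intro Q hPQ T ha hc
    have hlen : (P' ++ [s]).length = P'.length + 1 := by simp
    rw [hlen, pvIdx_succ, List.foldl_cons]
    have hPQ' : S = P' ++ (s :: Q) := by rw [hPQ]; simp
    have hsQ : ∀ x ∈ (s :: Q), 0 ≤ x := by
      intro x hx
      exact hS x (by rw [hPQ']; exact List.mem_append_right _ hx)
    have hgood : pvGood tgt (pvReachOf tgt (s :: Q)) := pvGood_reachOf tgt ht (s :: Q) hsQ
    have hdrop : S.drop P'.length = s :: Q := by
      rw [hPQ']
      simp
    have hr : PySem.List.pyGetD (pvRchFor tgt S) ((P'.length : Nat) : Int) [] =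
        pvReachOf tgt (s :: Q) := by
      rw [pvRchFor_getD tgt S (by rw [hPQ']; simp), hdrop]
    have hstepEq := pvBStep_collapse ht hgood (pvRchFor tgt S) (P'.length : Int) hr T
    set r := pvReachOf tgt (s :: Q) with hrdef
    have hfresh : ∀ a ∈ (PySem.List.pyRange 0 (tgt + 1)),
        T.contains ((P'.length : Int), a) = false := by
      intro a _
      by_contra hch
      have := hc _ (Bool.of_not_eq_false hch)
      simp at this
    have hnd : (((PySem.List.pyRange 0 (tgt + 1))).map (fun a => (((P'.length : Int), a) : Int × Int))).Nodup :=
      (pvR_nodup tgt ht).map (fun a b h => by simpa [Prod.ext_iff] using h)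
    have hstep : (pvBStep (pvRchFor tgt S) tgt T (P'.length : Int)).items =
        T.items ++ ((PySem.List.pyRange 0 (tgt + 1))).map (fun a => (((P'.length : Int), a),
          a - pvMaxle r a)) := by
      rw [hstepEq]
      exact PySem.Dict.items_foldl_insert_fresh ((PySem.List.pyRange 0 (tgt + 1))) _ _ T hfresh hnd
    apply ih (s :: Q) hPQ'
    · rw [hstep, ha, pvRchFor_cons, List.map_cons, pvFlat_cons]
      congr 1
      have hlab : (S.length : Int) - (((pvRchFor tgt Q).map (pvRowOf tgt)).length : Int) =
          (P'.length : Int) := by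
        rw [List.length_map, pvRchFor_len, hPQ']
        push_cast [List.length_append, List.length_cons]
        omega
      rw [hlab, pvRchFor_headD]
      show ((PySem.List.pyRange 0 (tgt + 1))).map (fun a => (((P'.length : Int), a), a - pvMaxle r a)) =
          (PySem.List.enumerate (pvRowOf tgt (pvReachStep tgt s (pvReachOf tgt Q)))).map
            (fun jv => (((P'.length : Int), jv.1), jv.2))
      have hsr : pvReachStep tgt s (pvReachOf tgt Q) = r := rfl
      rw [hsr, pvRowOf, pvBlock_eq]
    · intro q hq
      rw [hstepEq] at hq
      rcases pvContains_fold _ _ _ _ _ hq with h' | ⟨a, _, rfl⟩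
      · have := hc _ h'
        simp at this ⊢
        omega
      · simp

lemma pvBase_items (tgt : Int) (ht : 0 ≤ tgt) (k : Int) :
    (((PySem.List.pyRange 0 (tgt + 1))).foldl (fun T j => T.insert (k, j) j) PySem.Dict.empty).items =
      ((PySem.List.pyRange 0 (tgt + 1))).map (fun j => ((k, j), j)) := by
  have := PySem.Dict.items_foldl_insert_fresh ((PySem.List.pyRange 0 (tgt + 1))) (fun j => ((k, j) : Int × Int))
    (fun j => j) PySem.Dict.empty (fun a _ => rfl)
    ((pvR_nodup tgt ht).map (fun a b h => by simpa [Prod.ext_iff] using h))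
  simpa [PySem.Dict.empty] using this

-- ===== VERDICT (by name: the statements are the Claim_ definitions above) =====
theorem memoTargetSum_spec : Claim_equal_memoTargetSum := by
  intro S tgt _ hPre
  obtain ⟨ht, hS⟩ := hPre
  unfold Spec_memoTargetSum
  rw [pvA_eq, pvB_eq, pvDown_eq S.length]
  congr 1
  have hbase : (((PySem.List.pyRange 0 (tgt + 1))).foldl
      (fun T j => T.insert ((S.length : Int), j) j) PySem.Dict.empty).items =
      pvFlat (S.length : Int) [PySem.List.pyRange 0 (tgt + 1)] := by
    rw [pvBase_items tgt ht]
    rw [pvFlat]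
    simp only [List.reverse_cons, List.reverse_nil, List.nil_append]
    have h1 : PySem.List.enumerate [PySem.List.pyRange 0 (tgt + 1)] =
        [((0 : Int), PySem.List.pyRange 0 (tgt + 1))] := rfl
    rw [h1]
    simp only [List.flatMap_cons, List.flatMap_nil, List.append_nil, Int.sub_zero]
    rw [pvEnumBlock_base]
  have hA : ((pvIdxList S.length).foldl (pvAStep S tgt)
      (((PySem.List.pyRange 0 (tgt + 1))).foldl
        (fun T j => T.insert ((S.length : Int), j) j) PySem.Dict.empty)).items =
      pvFlat (S.length : Int) (pvRRfor tgt S) := by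
    apply pvMain tgt ht S hS S [] (by simp)
    · rw [hbase]
      rfl
    · intro j hj
      rw [pvRRfor]
      simp only [List.reverse_nil, List.foldl_nil, List.headD_cons]
      rw [pvGet?_fold_mem _ (pvR_nodup tgt ht) _ _ _ _ hj, pvGetD_R ht hj]
    · intro q hq
      rcases pvContains_fold _ _ _ _ _ hq with h' | ⟨a, _, rfl⟩
      · cases h'
      · simp
  have hB : ((pvIdxList S.length).foldl (pvBStep (pvRchFor tgt S) tgt)
      (((PySem.List.pyRange 0 (tgt + 1))).foldl
        (fun T j => T.insert ((S.length : Int), j) j) PySem.Dict.empty)).items =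
      pvFlat (S.length : Int) ((pvRchFor tgt S).map (pvRowOf tgt)) := by
    apply pvMainB tgt ht S hS S [] (by simp)
    · rw [hbase]
      show pvFlat (S.length : Int) [PySem.List.pyRange 0 (tgt + 1)] =
        pvFlat (S.length : Int) [pvRowOf tgt [0]]
      rw [pvRowOf_base tgt ht]
    · intro q hq
      rcases pvContains_fold _ _ _ _ _ hq with h' | ⟨a, _, rfl⟩
      · cases h'
      · simp
  rw [hA, hB, pvRRfor_eq_rowOf tgt ht S hS]
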